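-- pv_equiv track=rewrite | github.com/cowsking/projects-CS61A | hog/hog.py | bacon_strategy
-- ===== SOURCE A (Python) =====
-- def free_bacon(opponent_score):
--     """Return the points scored from rolling 0 dice (Free Bacon)."""
--     # BEGIN PROBLEM 2
--     "*** REPLACE THIS LINE ***"
--     a = opponent_score
--     b = a // 10
--     c = a % 10
--     return max(b, c) + 1
--
-- def if_prime(number):
--     if number == 1:
--         return False
--     k = 2
--     while k < number:
--         if number % k == 0:
--             return False
--         k += 1
--     return True
--
-- def bacon_strategy(score, opponent_score, margin=8, num_rolls=4):
--     """This strategy rolls 0 dice if that gives at least MARGIN points, and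
--     rolls NUM_ROLLS otherwise.
--     """
--     # BEGIN PROBLEM 10
--     "*** REPLACE THIS LINE ***"
--     score0 = free_bacon(opponent_score)
--     if if_prime(score0):
--         while True:
--             score0 += 1
--             if if_prime(score0):
--                 if score0 >= margin:
--                     return 0
--                 else:
--                     return num_rolls
--     elif score0 >= margin:
--         return 0
--     return num_rolls
-- ===== SOURCE B (Python) =====
-- def _is_prime(n):
--     """Trial division up to sqrt(n): O(sqrt n) instead of O(n)."""
--     if n < 2:
--         return False
--     k = 2
--     while k * k <= n:
--         if n % k == 0:
--             return False
--         k += 1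
--     return True
--
--
-- def bacon_strategy(score, opponent_score, margin=8, num_rolls=4):
--     v = max(opponent_score // 10, opponent_score % 10) + 1
--     if _is_prime(v):
--         v += 1
--         while not _is_prime(v):
--             v += 1
--     return 0 if v >= margin else num_rolls
-- ===== Notes on version B (the rewrite author's own statement) =====
-- stated objective: faster
-- what changed: Primality is tested by trial division only up to sqrt(n) instead of scanning every integer below n, the free-bacon score is computed inline, and the two margin comparisons are merged into one final comparison after an optional next-prime bump loop.
import Mathlib
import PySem

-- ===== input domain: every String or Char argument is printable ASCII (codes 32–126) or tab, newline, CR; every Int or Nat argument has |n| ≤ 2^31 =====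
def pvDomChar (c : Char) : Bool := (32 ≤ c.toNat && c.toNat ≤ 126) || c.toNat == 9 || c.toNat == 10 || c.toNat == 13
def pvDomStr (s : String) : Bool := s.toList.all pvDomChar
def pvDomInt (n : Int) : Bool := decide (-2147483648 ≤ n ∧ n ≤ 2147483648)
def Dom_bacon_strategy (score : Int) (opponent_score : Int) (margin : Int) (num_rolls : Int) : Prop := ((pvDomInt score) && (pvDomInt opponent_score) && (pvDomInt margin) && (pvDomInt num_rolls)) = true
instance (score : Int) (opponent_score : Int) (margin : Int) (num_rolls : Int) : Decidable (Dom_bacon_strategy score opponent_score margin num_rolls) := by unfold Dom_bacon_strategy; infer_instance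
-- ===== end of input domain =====

-- B replaces A's O(n) scan-every-integer primality test by O(√n) trial division up to √n,
-- computes the free-bacon score inline, and merges the two margin comparisons into one.

-- ===== PORT A =====
-- free_bacon: max(a // 10, a % 10) + 1
def free_bacon (opponent_score : Int) : Int :=
  max (PySem.Int.floordiv opponent_score 10) (PySem.Int.mod opponent_score 10) + 1

-- A's `while k < number` trial-division loop over ALL k in [2, number); the fuel
-- (number - 2 at the call site below) only makes the recursion structural, it is never exhausted early
def ifPrimeLoopA (number : Int) (fuel : Nat) (k : Int) : Bool :=
  match fuel with
  | 0 => true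
  | f + 1 =>
    if k < number then
      if PySem.Int.mod number k = 0 then false else ifPrimeLoopA number f (k + 1)
    else true

def if_prime (number : Int) : Bool :=
  if number = 1 then false else ifPrimeLoopA number (number - 2).toNat 2

-- A's `while True: score0 += 1; if if_prime(score0): …` search loop. The fuel only makes it
-- total: on every admitted input the fuel used below (2·score0+4) exceeds the number of
-- iterations the Python loop performs (Bertrand's postulate; proved in baconLoopA_reaches below).
def baconLoopA (fuel : Nat) (s : Int) : Int :=
  match fuel with
  | 0 => s + 1
  | f + 1 => if if_prime (s + 1) then s + 1 else baconLoopA f (s + 1)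

def bacon_strategy (score : Int) (opponent_score : Int) (margin : Int) (num_rolls : Int) : Int :=
  let score0 := free_bacon opponent_score
  if if_prime score0 then
    let t := baconLoopA (2 * score0.toNat + 4) score0
    if t ≥ margin then 0 else num_rolls
  else if score0 ≥ margin then 0 else num_rolls

-- ===== PORT B =====
-- B's `while k * k <= n` trial-division loop (only up to √n); fuel n at the call site
-- makes the recursion structural and is never exhausted early (k stops before exceeding n)
def isPrimeLoopB (n : Int) (fuel : Nat) (k : Int) : Bool :=
  match fuel with
  | 0 => true
  | f + 1 =>
    if k * k ≤ n then
      if PySem.Int.mod n k = 0 then false else isPrimeLoopB n f (k + 1)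
    else true

def is_prime_alt (n : Int) : Bool :=
  if n < 2 then false else isPrimeLoopB n n.toNat 2

-- B's `v += 1; while not _is_prime(v): v += 1` loop, again total by a sufficient fuel
def nextLoopB (fuel : Nat) (w : Int) : Int :=
  match fuel with
  | 0 => w
  | f + 1 => if is_prime_alt w then w else nextLoopB f (w + 1)

def bacon_strategy_alt (score : Int) (opponent_score : Int) (margin : Int) (num_rolls : Int) : Int :=
  let v := max (PySem.Int.floordiv opponent_score 10) (PySem.Int.mod opponent_score 10) + 1
  let w := if is_prime_alt v then nextLoopB (2 * v.toNat + 4) (v + 1) else v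
  if w ≥ margin then 0 else num_rolls

-- ===== PRECONDITION & SPEC =====
def Spec_bacon_strategy (score : Int) (opponent_score : Int) (margin : Int) (num_rolls : Int) (out : Int) : Prop := out = bacon_strategy_alt score opponent_score margin num_rolls
instance (score : Int) (opponent_score : Int) (margin : Int) (num_rolls : Int) (out : Int) : Decidable (Spec_bacon_strategy score opponent_score margin num_rolls out) := by unfold Spec_bacon_strategy; infer_instance

-- ===== CLAIM (what is proved, stated in full; the proofs are below) =====
def Claim_equal_bacon_strategy : Prop := ∀ (score : Int) (opponent_score : Int) (margin : Int) (num_rolls : Int), Dom_bacon_strategy score opponent_score margin num_rolls → Spec_bacon_strategy score opponent_score margin num_rolls (bacon_strategy score opponent_score margin num_rolls)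

-- ===== LEMMAS AND PROOFS =====

-- Characterisation of A's trial-division loop (the fuel is sufficient by hypothesis)
theorem ifPrimeLoopA_iff : ∀ (fuel : Nat) (number k : Int), number - k ≤ (fuel : Int) →
    (ifPrimeLoopA number fuel k = true ↔
      ∀ j : Int, k ≤ j → j < number → PySem.Int.mod number j ≠ 0) := by
  intro fuel
  induction fuel with
  | zero =>
    intro number k hf
    simp only [ifPrimeLoopA, true_iff]
    intro j hj hjn
    omega
  | succ f ih =>
    intro number k hf
    show (if k < number then _ else true) = true ↔ _
    by_cases hlt : k < number
    · rw [if_pos hlt]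
      by_cases hm : PySem.Int.mod number k = 0
      · rw [if_pos hm]
        constructor
        · intro h; cases h
        · intro h; exact absurd hm (h k le_rfl hlt)
      · rw [if_neg hm, ih number (k + 1) (by push_cast at hf ⊢; omega)]
        constructor
        · intro h j hj hjn
          rcases eq_or_lt_of_le hj with rfl | hj'
          · exact hm
          · exact h j (by omega) hjn
        · intro h j hj hjn; exact h j (by omega) hjn
    · rw [if_neg hlt]
      constructor
      · intro _ j hj hjn; omega
      · intro _; rfl

-- A's if_prime agrees with genuine primality on integers ≥ 2
theorem if_prime_iff_prime (n : Int) (h : 2 ≤ n) :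
    if_prime n = true ↔ Nat.Prime n.toNat := by
  have hne : n ≠ 1 := by omega
  rw [if_prime, if_neg hne, ifPrimeLoopA_iff (n - 2).toNat n 2 (by omega), Nat.prime_def_lt']
  constructor
  · intro hnd
    refine ⟨by omega, ?_⟩
    intro m hm hmlt hdvd
    have h1 : PySem.Int.mod n (m : Int) = 0 := by
      rw [PySem.Int.mod_eq_zero_iff_dvd]
      have : (m : Int) ∣ (n.toNat : Int) := Int.natCast_dvd_natCast.mpr hdvd
      rwa [Int.toNat_of_nonneg (by omega)] at this
    exact hnd (m : Int) (by exact_mod_cast hm) (by omega) h1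
  · intro ⟨_, hp⟩ j hj hjn hm
    rw [PySem.Int.mod_eq_zero_iff_dvd] at hm
    have hjd : j.toNat ∣ n.toNat := by
      have : (j.toNat : Int) ∣ (n.toNat : Int) := by
        rwa [Int.toNat_of_nonneg (by omega), Int.toNat_of_nonneg (by omega)]
      exact_mod_cast this
    exact hp j.toNat (by omega) (by omega) hjd

-- Characterisation of B's trial-division loop (the fuel is sufficient by hypothesis)
theorem isPrimeLoopB_iff : ∀ (fuel : Nat) (n k : Int), 2 ≤ k → n + 1 - k ≤ (fuel : Int) →
    (isPrimeLoopB n fuel k = true ↔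
      ∀ j : Int, k ≤ j → j * j ≤ n → PySem.Int.mod n j ≠ 0) := by
  intro fuel
  induction fuel with
  | zero =>
    intro n k hk2 hf
    simp only [isPrimeLoopB, true_iff]
    intro j hj hjj
    have hj1 : 1 ≤ j := by omega
    have hjs : j ≤ j * j := le_mul_of_one_le_left (by omega) hj1
    omega
  | succ f ih =>
    intro n k hk2 hf
    show (if k * k ≤ n then _ else true) = true ↔ _
    by_cases hlt : k * k ≤ n
    · rw [if_pos hlt]
      by_cases hm : PySem.Int.mod n k = 0
      · rw [if_pos hm]
        constructor
        · intro h; cases h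
        · intro h; exact absurd hm (h k le_rfl hlt)
      · rw [if_neg hm, ih n (k + 1) (by omega) (by push_cast at hf ⊢; omega)]
        constructor
        · intro h j hj hjn
          rcases eq_or_lt_of_le hj with rfl | hj'
          · exact hm
          · exact h j (by omega) hjn
        · intro h j hj hjn; exact h j (by omega) hjn
    · rw [if_neg hlt]
      constructor
      · intro _ j hj hjn
        exact absurd hjn (by intro hc; exact hlt (by nlinarith))
      · intro _; rfl

-- B's _is_prime agrees with genuine primality on integers ≥ 2
theorem is_prime_alt_iff_prime (n : Int) (h : 2 ≤ n) :
    is_prime_alt n = true ↔ Nat.Prime n.toNat := by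
  rw [is_prime_alt, if_neg (by omega), isPrimeLoopB_iff n.toNat n 2 le_rfl (by omega),
    Nat.prime_def_le_sqrt]
  constructor
  · intro hnd
    refine ⟨by omega, ?_⟩
    intro m hm hms hdvd
    have hmm : ((m : Int)) * (m : Int) ≤ n := by
      have := Nat.le_sqrt.mp hms
      have h2 : ((m * m : Nat) : Int) ≤ ((n.toNat : Nat) : Int) := by exact_mod_cast this
      push_cast at h2
      omega
    have h1 : PySem.Int.mod n (m : Int) = 0 := by
      rw [PySem.Int.mod_eq_zero_iff_dvd]
      have : (m : Int) ∣ (n.toNat : Int) := Int.natCast_dvd_natCast.mpr hdvd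
      rwa [Int.toNat_of_nonneg (by omega)] at this
    exact hnd (m : Int) (by exact_mod_cast hm) hmm h1
  · intro ⟨_, hp⟩ j hj hjj hm
    rw [PySem.Int.mod_eq_zero_iff_dvd] at hm
    have hjd : j.toNat ∣ n.toNat := by
      have : (j.toNat : Int) ∣ (n.toNat : Int) := by
        rwa [Int.toNat_of_nonneg (by omega), Int.toNat_of_nonneg (by omega)]
      exact_mod_cast this
    have hjs : j.toNat ≤ n.toNat.sqrt := by
      rw [Nat.le_sqrt]
      have : ((j.toNat * j.toNat : Nat) : Int) ≤ ((n.toNat : Nat) : Int) := by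
        push_cast
        rw [Int.toNat_of_nonneg (by omega : (0:Int) ≤ j), Int.toNat_of_nonneg (by omega : (0:Int) ≤ n)]
        exact hjj
      exact_mod_cast this
    exact hp j.toNat (by omega) hjs hjd

-- the two primality tests agree on every integer ≥ 1 (the only values bacon_strategy feeds them)
theorem prime_agree (n : Int) (h : 1 ≤ n) : if_prime n = is_prime_alt n := by
  rcases eq_or_lt_of_le h with rfl | h2
  · rfl
  · have h2' : 2 ≤ n := by omega
    rcases hb : is_prime_alt n with _ | _
    · rcases ha : if_prime n with _ | _
      · rfl
      · rw [if_prime_iff_prime n h2'] at ha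
        rw [← is_prime_alt_iff_prime n h2'] at ha
        rw [ha] at hb; cases hb
    · rw [is_prime_alt_iff_prime n h2'] at hb
      rw [← if_prime_iff_prime n h2'] at hb
      exact hb

-- with enough fuel, A's loop returns the least t > s accepted by if_prime
theorem baconLoopA_reaches : ∀ (fuel : Nat) (s t : Int), s < t → if_prime t = true →
    (∀ u : Int, s < u → u < t → ¬ if_prime u = true) → t - s ≤ (fuel : Int) →
    baconLoopA fuel s = t := by
  intro fuel
  induction fuel with
  | zero => intro s t hst _ _ hle; omega
  | succ f ih =>
    intro s t hst hp hmin hle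
    by_cases h1 : if_prime (s + 1) = true
    · have ht : t = s + 1 := by
        by_contra hne
        exact hmin (s + 1) (by omega) (by omega) h1
      simp only [baconLoopA, h1, if_true]
      omega
    · have ht1 : t ≠ s + 1 := by intro he; rw [he] at hp; exact h1 hp
      simp only [baconLoopA, h1, if_false, Bool.false_eq_true]
      exact ih (s + 1) t (by omega) hp (fun u hu1 hu2 => hmin u (by omega) hu2)
        (by push_cast at hle ⊢; omega)

-- with enough fuel, B's loop returns the least t ≥ w accepted by is_prime_alt
theorem nextLoopB_reaches : ∀ (fuel : Nat) (w t : Int), w ≤ t → is_prime_alt t = true →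
    (∀ u : Int, w ≤ u → u < t → ¬ is_prime_alt u = true) → t - w ≤ (fuel : Int) →
    nextLoopB fuel w = t := by
  intro fuel
  induction fuel with
  | zero =>
    intro w t hst hp _ hle
    have : t = w := by omega
    simp [nextLoopB, this]
  | succ f ih =>
    intro w t hst hp hmin hle
    by_cases h1 : is_prime_alt w = true
    · have ht : t = w := by
        by_contra hne
        exact hmin w le_rfl (by omega) h1
      simp only [nextLoopB, h1, if_true]
      omega
    · have ht1 : t ≠ w := by intro he; rw [he] at hp; exact h1 hp
      simp only [nextLoopB, h1, if_false, Bool.false_eq_true]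
      exact ih (w + 1) t (by omega) hp (fun u hu1 hu2 => hmin u (by omega) hu2)
        (by push_cast at hle ⊢; omega)

theorem free_bacon_ge_one (o : Int) : 1 ≤ free_bacon o := by
  have h := PySem.Int.mod_nonneg o (show (0:Int) < 10 by norm_num)
  unfold free_bacon
  have : PySem.Int.mod o 10 ≤ max (PySem.Int.floordiv o 10) (PySem.Int.mod o 10) :=
    le_max_right _ _
  omega

-- Bertrand: there is a t with s < t ≤ 2·s + 4 accepted by if_prime; hence a LEAST such t exists
theorem exists_least_accepted (s : Int) (hs : 2 ≤ s) :
    ∃ t : Int, s < t ∧ t - s ≤ 2 * (s.toNat : Int) + 4 ∧ if_prime t = true ∧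
      ∀ u : Int, s < u → u < t → ¬ if_prime u = true := by
  obtain ⟨p, hp, hlt, hlt2⟩ := Nat.exists_prime_lt_and_le_two_mul s.toNat (by omega)
  have hpA : if_prime (p : Int) = true := by
    rw [if_prime_iff_prime _ (by exact_mod_cast hp.two_le)]
    simpa using hp
  have hex : ∃ n : Nat, if_prime (s + 1 + (n : Int)) = true := by
    refine ⟨((p : Int) - (s + 1)).toNat, ?_⟩
    have : s + 1 ≤ (p : Int) := by omega
    have he : s + 1 + ((((p : Int) - (s + 1)).toNat : Int)) = (p : Int) := by omega
    rw [he]; exact hpA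
  refine ⟨s + 1 + (Nat.find hex : Int), by omega, ?_, Nat.find_spec hex, ?_⟩
  · have hb : (Nat.find hex : Int) ≤ ((p : Int) - (s + 1)).toNat := by
      exact_mod_cast Nat.find_min' hex (by
        have : s + 1 ≤ (p : Int) := by omega
        have he : s + 1 + ((((p : Int) - (s + 1)).toNat : Int)) = (p : Int) := by omega
        rw [he]; exact hpA)
    omega
  · intro u hu1 hu2 hu
    have : ¬ if_prime (s + 1 + (((u - (s + 1)).toNat : Nat) : Int)) = true := by
      apply Nat.find_min hex
      omega
    have he : s + 1 + (((u - (s + 1)).toNat : Nat) : Int) = u := by omega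
    rw [he] at this
    exact this hu

theorem aEq (score opponent_score margin num_rolls : Int) :
    bacon_strategy score opponent_score margin num_rolls =
      if if_prime (free_bacon opponent_score) then
        (if baconLoopA (2 * (free_bacon opponent_score).toNat + 4) (free_bacon opponent_score) ≥ margin
          then 0 else num_rolls)
      else if free_bacon opponent_score ≥ margin then 0 else num_rolls := rfl

theorem altEq (score opponent_score margin num_rolls : Int) :
    bacon_strategy_alt score opponent_score margin num_rolls =
      if (if is_prime_alt (free_bacon opponent_score) then
            nextLoopB (2 * (free_bacon opponent_score).toNat + 4) (free_bacon opponent_score + 1)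
          else free_bacon opponent_score) ≥ margin
      then 0 else num_rolls := rfl

-- ===== VERDICT (by name: the statement is the Claim_ definition above) =====
theorem bacon_strategy_spec : Claim_equal_bacon_strategy := by
  intro score opponent_score margin num_rolls _
  unfold Spec_bacon_strategy
  rw [aEq, altEq]
  set s := free_bacon opponent_score with hs
  have hs1 : 1 ≤ s := free_bacon_ge_one opponent_score
  have hpa : if_prime s = is_prime_alt s := prime_agree s hs1
  by_cases hp : if_prime s = true
  · have hs2 : 2 ≤ s := by
      by_cases h1 : s = 1
      · have hf : if_prime 1 = false := by decide
        rw [h1, hf] at hp; cases hp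
      · omega
    obtain ⟨t, hst, hbound, htp, hmin⟩ := exists_least_accepted s hs2
    have hA : baconLoopA (2 * s.toNat + 4) s = t :=
      baconLoopA_reaches _ s t hst htp hmin (by push_cast; omega)
    have hB : nextLoopB (2 * s.toNat + 4) (s + 1) = t := by
      apply nextLoopB_reaches _ (s + 1) t (by omega)
      · rw [← prime_agree t (by omega)]; exact htp
      · intro u hu1 hu2
        rw [← prime_agree u (by omega)]
        exact hmin u (by omega) hu2
      · push_cast; omega
    rw [if_pos hp, if_pos (show is_prime_alt s = true by rw [← hpa]; exact hp), hA, hB]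
  · rw [if_neg hp, if_neg (show ¬ is_prime_alt s = true by rw [← hpa]; exact hp)]
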